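-- pv_equiv track=rewrite | github.com/manishagunda/PLACEMENT_SUMMER_TRAINING_2024 | June_15/island_area.py | count_islands_and_max_area
-- ===== SOURCE A (Python) =====
-- def find_area(i, j, n, a):
--     # If out of bounds or the cell is not land, return 0
--     if i < 0 or i >= n or j < 0 or j >= n or a[i][j] != 1:
--         return 0
--
--     # Mark the cell as visited
--     a[i][j] = '0'
--
--     # Initialize area
--     area = 1
--
--     # Recursively find area of the island
--     area += find_area(i-1, j, n, a)  # Up
--     area += find_area(i+1, j, n, a)  # Down
--     area += find_area(i, j-1, n, a)  # Left
--     area += find_area(i, j+1, n, a)  # Right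
--
--     return area
--
-- def count_islands_and_max_area(a):
--     n = len(a)
--     num_islands = 0
--     max_area = 0
--
--     for i in range(n):
--         for j in range(n):
--             if a[i][j] == 1:
--                 num_islands += 1
--                 current_area = find_area(i, j, n, a)
--                 max_area = max(max_area, current_area)
--
--     return num_islands, max_area
-- ===== SOURCE B (Python) =====
-- def count_islands_and_max_area(a):
--     # Iterative flood fill with an explicit stack instead of recursion
--     # (mutates a in place like the original: visited land cells become '0').
--     n = len(a)
--     num_islands = 0
--     max_area = 0
--     for i in range(n):
--         for j in range(n):
--             if a[i][j] == 1:
--                 num_islands += 1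
--                 area = 0
--                 stack = [(i, j)]
--                 while stack:
--                     x, y = stack.pop()
--                     if 0 <= x < n and 0 <= y < n and a[x][y] == 1:
--                         a[x][y] = '0'
--                         area += 1
--                         stack.append((x, y + 1))
--                         stack.append((x, y - 1))
--                         stack.append((x + 1, y))
--                         stack.append((x - 1, y))
--                 max_area = max(max_area, area)
--     return num_islands, max_area
-- ===== Notes on version B (the rewrite author's own statement) =====
-- stated objective: alternative
-- what changed: The recursive four-way DFS find_area is replaced by an iterative flood fill with an explicit stack (mark at pop, push the four neighbours), removing recursion (and its depth limit) while keeping the same scan loop.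
import Mathlib
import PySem

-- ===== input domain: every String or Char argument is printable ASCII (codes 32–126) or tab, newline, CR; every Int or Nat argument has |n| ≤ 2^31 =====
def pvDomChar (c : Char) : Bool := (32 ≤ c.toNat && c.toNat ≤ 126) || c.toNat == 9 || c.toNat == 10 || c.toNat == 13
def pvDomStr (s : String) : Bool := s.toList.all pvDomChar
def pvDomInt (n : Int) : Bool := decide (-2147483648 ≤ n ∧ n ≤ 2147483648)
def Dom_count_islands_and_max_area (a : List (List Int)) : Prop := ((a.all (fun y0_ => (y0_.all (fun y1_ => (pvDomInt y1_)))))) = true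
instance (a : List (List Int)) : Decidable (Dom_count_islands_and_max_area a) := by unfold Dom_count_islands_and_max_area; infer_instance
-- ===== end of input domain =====

-- B replaces the recursive DFS by an explicit-stack flood fill (same return value; like A,
-- the Python B mutates the grid in place — the equivalence proved here is about the return value,
-- and B performs the same mutation).

-- Shared cell accessors. Both Pythons read a[i][j] and write a[i][j] = '0' only under the
-- guard 0 ≤ i < n, 0 ≤ j < n (and, via Pre_, j < len(a[i])), where these equal Python's indexing;
-- the '0' marker is modelled as the Int 0, distinguishable from 1 exactly as the string is.
def gget (g : List (List Int)) (i j : Int) : Int :=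
  (g.getD i.toNat []).getD j.toNat 0

def gset (g : List (List Int)) (i j : Int) : List (List Int) :=
  g.set i.toNat ((g.getD i.toNat []).set j.toNat 0)

-- number of land cells; termination measure for the flood fill and fuel bound for the DFS
def ones (g : List (List Int)) : Nat := (g.map (fun r => r.count 1)).sum

-- cited by flood's decreasing_by: marking a land cell removes exactly one 1
theorem ones_gset (g : List (List Int)) (x y : Int)
    (h1 : gget g x y = 1) : ones (gset g x y) + 1 = ones g := by
  have hk : x.toNat < g.length := by
    by_contra hk
    rw [gget] at h1
    simp [List.getD_eq_getElem?_getD, List.getElem?_eq_none (Nat.le_of_not_lt hk)] at h1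
  have hgr : g.getD x.toNat [] = g[x.toNat] := by
    simp [List.getD_eq_getElem?_getD, List.getElem?_eq_getElem hk]
  have hm : y.toNat < g[x.toNat].length := by
    by_contra hm
    rw [gget, hgr] at h1
    simp [List.getD_eq_getElem?_getD, List.getElem?_eq_none (Nat.le_of_not_lt hm)] at h1
  have hcell : g[x.toNat][y.toNat] = 1 := by
    rw [gget, hgr] at h1
    simpa [List.getD_eq_getElem?_getD, List.getElem?_eq_getElem hm] using h1
  have hpos : 0 < g[x.toNat].count 1 :=
    List.count_pos_iff.mpr (hcell ▸ List.getElem_mem hm)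
  have hcnt : (g[x.toNat].set y.toNat 0).count 1 + 1 = g[x.toNat].count 1 := by
    rw [List.count_set hm]
    simp [hcell]
    omega
  have hlen : x.toNat < (g.map (fun r => r.count 1)).length := by simpa using hk
  unfold ones gset
  rw [hgr, List.map_set]
  conv_rhs => rw [← List.set_getElem_self (as := g.map (fun r => r.count 1)) (i := x.toNat) hlen]
  rw [List.sum_set, List.sum_set]
  simp only [if_pos hlen, List.getElem_map]
  omega

theorem ones_gset_lt (g : List (List Int)) (x y : Int)
    (h1 : gget g x y = 1) : ones (gset g x y) < ones g := by
  have := ones_gset g x y h1; omega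

-- ===== PORT A =====
-- recursive DFS; fuel is only a totality guard: the recursion depth is bounded by the
-- number of land cells, so fuel = ones g + 1 at the call site is never exhausted
def findArea : Nat → Int → Int → Int → List (List Int) → Int × List (List Int)
  | 0, _, _, _, g => (0, g)
  | fuel+1, i, j, n, g =>
    if i < 0 ∨ n ≤ i ∨ j < 0 ∨ n ≤ j then (0, g)
    else if gget g i j ≠ 1 then (0, g)
    else
      let g0 := gset g i j
      let r1 := findArea fuel (i-1) j n g0
      let r2 := findArea fuel (i+1) j n r1.2
      let r3 := findArea fuel i (j-1) n r2.2
      let r4 := findArea fuel i (j+1) n r3.2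
      (1 + r1.1 + r2.1 + r3.1 + r4.1, r4.2)

def count_islands_and_max_area (a : List (List Int)) : Int × Int :=
  let n : Int := a.length
  let idxs := (List.range a.length).map (fun k => (k : Int))
  let res := idxs.foldl (fun st i =>
    idxs.foldl (fun (st : Int × Int × List (List Int)) j =>
      let (num, maxA, g) := st
      if gget g i j = 1 then
        let r := findArea (ones g + 1) i j n g
        (num + 1, max maxA r.1, r.2)
      else st) st) ((0 : Int), (0 : Int), a)
  (res.1, res.2.1)

-- ===== PORT B =====
-- iterative flood fill: pop a cell, and if it is in-bounds land, mark it and push its four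
-- neighbours (so they are popped up, down, left, right); total by (land cells, stack length)
def flood (n : Int) : List (Int × Int) → Int → List (List Int) → Int × List (List Int)
  | [], area, g => (area, g)
  | (x, y) :: st, area, g =>
    if h : 0 ≤ x ∧ x < n ∧ 0 ≤ y ∧ y < n ∧ gget g x y = 1 then
      flood n ((x-1, y) :: (x+1, y) :: (x, y-1) :: (x, y+1) :: st) (area + 1) (gset g x y)
    else flood n st area g
termination_by st _ g => (ones g, st.length)
decreasing_by
  · exact Prod.Lex.left _ _ (ones_gset_lt g x y h.2.2.2.2)
  · exact Prod.Lex.right _ (by simp)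

def count_islands_and_max_area_alt (a : List (List Int)) : Int × Int :=
  let n : Int := a.length
  let idxs := (List.range a.length).map (fun k => (k : Int))
  let res := idxs.foldl (fun st i =>
    idxs.foldl (fun (st : Int × Int × List (List Int)) j =>
      let (num, maxA, g) := st
      if gget g i j = 1 then
        let r := flood n [(i, j)] 0 g
        (num + 1, max maxA r.1, r.2)
      else st) st) ((0 : Int), (0 : Int), a)
  (res.1, res.2.1)

-- ===== PRECONDITION & SPEC =====
-- Pre_ excludes exactly the grids with a row shorter than len(a): there both Pythons raise
-- IndexError while scanning row i up to column len(a)-1.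
def Pre_count_islands_and_max_area (a : List (List Int)) : Prop :=
  ∀ r ∈ a, a.length ≤ r.length
instance (a : List (List Int)) : Decidable (Pre_count_islands_and_max_area a) := by
  unfold Pre_count_islands_and_max_area; infer_instance

def pvWitness_count_islands_and_max_area : List (List Int) := [[1, 0], [0, 1]]

def Spec_count_islands_and_max_area (a : List (List Int)) (out : Int × Int) : Prop := out = count_islands_and_max_area_alt a
instance (a : List (List Int)) (out : Int × Int) : Decidable (Spec_count_islands_and_max_area a out) := by unfold Spec_count_islands_and_max_area; infer_instance

-- ===== CLAIM (what is proved, stated in full; the proofs are below) =====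
def Claim_equal_count_islands_and_max_area : Prop := ∀ (a : List (List Int)), Dom_count_islands_and_max_area a → Pre_count_islands_and_max_area a → Spec_count_islands_and_max_area a (count_islands_and_max_area a)

-- ===== LEMMAS AND PROOFS =====

theorem flood_nil (n : Int) (area : Int) (g : List (List Int)) :
    flood n [] area g = (area, g) := by
  rw [flood]

theorem flood_cons (n x y : Int) (st : List (Int × Int)) (area : Int) (g : List (List Int)) :
    flood n ((x, y) :: st) area g =
      if 0 ≤ x ∧ x < n ∧ 0 ≤ y ∧ y < n ∧ gget g x y = 1 then
        flood n ((x-1, y) :: (x+1, y) :: (x, y-1) :: (x, y+1) :: st) (area + 1) (gset g x y)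
      else flood n st area g := by
  rw [flood]; split_ifs <;> rfl

theorem ones_findArea_le (fuel : Nat) (x y n : Int) (g : List (List Int)) :
    ones (findArea fuel x y n g).2 ≤ ones g := by
  induction fuel generalizing x y g with
  | zero => simp [findArea]
  | succ fuel ih =>
    rw [findArea]
    split_ifs with h1 h2
    · simp
    · simp
    · simp only
      have hx : gget g x y = 1 := by simpa using h2
      have h0 := ones_gset_lt g x y hx
      calc ones (findArea fuel x (y+1) n _).2
          ≤ _ := ih _ _ _
        _ ≤ _ := ih _ _ _
        _ ≤ _ := ih _ _ _
        _ ≤ _ := ih _ _ _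
        _ ≤ ones g := Nat.le_of_lt h0

theorem flood_findArea (n : Int) (fuel : Nat) :
    ∀ (g : List (List Int)) (x y : Int) (st : List (Int × Int)) (area : Int),
      ones g < fuel →
      flood n ((x, y) :: st) area g =
        flood n st (area + (findArea fuel x y n g).1) (findArea fuel x y n g).2 := by
  induction fuel with
  | zero => intro g x y st area h; omega
  | succ fuel ih =>
    intro g x y st area hf
    rw [flood_cons, findArea]
    by_cases h : 0 ≤ x ∧ x < n ∧ 0 ≤ y ∧ y < n ∧ gget g x y = 1
    · rw [if_pos h]
      have hoob : ¬ (x < 0 ∨ n ≤ x ∨ y < 0 ∨ n ≤ y) := by omega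
      rw [if_neg hoob, if_neg (by simp [h.2.2.2.2])]
      simp only
      set g0 := gset g x y with hg0
      have h0 : ones g0 + 1 = ones g := ones_gset g x y h.2.2.2.2
      have hf0 : ones g0 < fuel := by omega
      set r1 := findArea fuel (x-1) y n g0 with hr1
      set r2 := findArea fuel (x+1) y n r1.2 with hr2
      set r3 := findArea fuel x (y-1) n r2.2 with hr3
      set r4 := findArea fuel x (y+1) n r3.2 with hr4
      have hf1 : ones r1.2 < fuel := lt_of_le_of_lt (ones_findArea_le _ _ _ _ _) hf0
      have hf2 : ones r2.2 < fuel := lt_of_le_of_lt (ones_findArea_le _ _ _ _ _) hf1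
      have hf3 : ones r3.2 < fuel := lt_of_le_of_lt (ones_findArea_le _ _ _ _ _) hf2
      rw [ih g0 (x-1) y _ _ hf0, ih r1.2 (x+1) y _ _ hf1, ih r2.2 x (y-1) _ _ hf2,
          ih r3.2 x (y+1) _ _ hf3]
      congr 1
      ring
    · rw [if_neg h]
      by_cases hoob : x < 0 ∨ n ≤ x ∨ y < 0 ∨ y ≥ n
      · rw [if_pos (by omega)]; simp
      · have hne : gget g x y ≠ 1 := by
          intro h1; exact h ⟨by omega, by omega, by omega, by omega, h1⟩
        rw [if_neg (by omega), if_pos hne]; simp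

theorem foldl_congr_fun {α β : Type} (l : List β) (f g : α → β → α) (init : α)
    (h : ∀ st x, f st x = g st x) : l.foldl f init = l.foldl g init := by
  induction l generalizing init with
  | nil => rfl
  | cons x l ih => simp only [List.foldl_cons, h]; exact ih _

theorem step_eq (n : Int) (i j : Int) (st : Int × Int × List (List Int)) :
    (let (num, maxA, g) := st
     if gget g i j = 1 then
       let r := findArea (ones g + 1) i j n g
       ((num + 1 : Int), max maxA r.1, r.2)
     else st) =
    (let (num, maxA, g) := st
     if gget g i j = 1 then
       let r := flood n [(i, j)] 0 g
       ((num + 1 : Int), max maxA r.1, r.2)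
     else st) := by
  obtain ⟨num, maxA, g⟩ := st
  simp only
  by_cases h : gget g i j = 1
  · rw [if_pos h, if_pos h]
    have := flood_findArea n (ones g + 1) g i j [] 0 (by omega)
    rw [this, flood_nil]
    simp
  · rw [if_neg h, if_neg h]

-- ===== VERDICT (by name: the statement is the Claim_ definition above) =====
theorem count_islands_and_max_area_spec : Claim_equal_count_islands_and_max_area := by
  intro a _ _
  unfold Spec_count_islands_and_max_area
  unfold count_islands_and_max_area count_islands_and_max_area_alt
  dsimp only
  refine congrArg (fun (r : Int × Int × List (List Int)) => (r.1, r.2.1)) ?_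
  refine foldl_congr_fun _ _ _ _ (fun st i => ?_)
  refine foldl_congr_fun _ _ _ _ (fun st j => ?_)
  exact step_eq (a.length : Int) i j st
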